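-- pv_equiv track=rewrite | github.com/Fdondi/hackaton-gocalm | multihead_pii/dataset.py | _enumerate_candidates
-- ===== SOURCE A (Python) =====
-- from typing import Dict, List, Optional, Set, Tuple
--
-- def is_valid_token(offset_pair: Tuple[int, int]) -> bool:
--     start, end = offset_pair
--     return not (start == 0 and end == 0)
--
-- def _enumerate_candidates(
--     offsets: List[Tuple[int, int]],
--     max_span_len: int,
-- ) -> List[Tuple[int, int]]:
--     valid_idxs = [i for i, off in enumerate(offsets) if is_valid_token(off)]
--     candidates: List[Tuple[int, int]] = []
--     for start in valid_idxs:
--         max_end = min(start + max_span_len - 1, len(offsets) - 1)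
--         for end in range(start, max_end + 1):
--             if not is_valid_token(offsets[end]):
--                 break
--             candidates.append((start, end))
--     return candidates
-- ===== SOURCE B (Python) =====
-- from typing import List, Tuple
--
-- def _enumerate_candidates(
--     offsets: List[Tuple[int, int]],
--     max_span_len: int,
-- ) -> List[Tuple[int, int]]:
--     # One backward pass computes, for each index, the length of the run of
--     # consecutive valid tokens starting there; then each span is emitted
--     # directly without any break-on-invalid rescanning.
--     n = len(offsets)
--     run = [0] * n
--     nxt = 0
--     for i in range(n - 1, -1, -1):
--         s, e = offsets[i]
--         nxt = 0 if (s == 0 and e == 0) else nxt + 1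
--         run[i] = nxt
--     out: List[Tuple[int, int]] = []
--     for i in range(n):
--         r = run[i]
--         if r > 0:
--             for j in range(min(max_span_len, r)):
--                 out.append((i, i + j))
--     return out
-- ===== Notes on version B (the rewrite author's own statement) =====
-- stated objective: alternative
-- what changed: Replaces the per-start forward scan with break-on-invalid by a single backward pass computing run lengths of consecutive valid tokens, from which each start's span count is read off directly (min(max_span_len, run[i])).
import Mathlib
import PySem

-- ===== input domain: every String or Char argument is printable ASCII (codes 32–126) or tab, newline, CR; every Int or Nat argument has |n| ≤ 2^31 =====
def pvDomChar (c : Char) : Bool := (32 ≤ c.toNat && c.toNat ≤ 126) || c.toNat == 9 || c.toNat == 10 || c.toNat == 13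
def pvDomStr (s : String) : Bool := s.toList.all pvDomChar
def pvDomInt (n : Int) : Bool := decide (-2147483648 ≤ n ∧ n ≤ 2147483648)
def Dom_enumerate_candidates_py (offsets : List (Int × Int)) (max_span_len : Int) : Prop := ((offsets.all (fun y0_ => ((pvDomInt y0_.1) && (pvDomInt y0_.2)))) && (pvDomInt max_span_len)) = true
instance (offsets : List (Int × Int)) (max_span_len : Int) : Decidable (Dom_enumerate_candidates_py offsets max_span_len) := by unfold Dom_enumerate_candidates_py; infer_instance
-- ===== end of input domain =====

-- B replaces A's per-start forward scan with break by a backward run-length pass; equivalent, similar cost (objective: alternative).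

-- ===== PORT A =====
-- is_valid_token
def isValidTok (p : Int × Int) : Bool := !(p.1 == 0 && p.2 == 0)

-- the inner 'for end in range(start, max_end+1): if not valid: break; append'
-- (offsets[end] is always in range here, so pyGetD's default is never used)
def innerLoopA (offsets : List (Int × Int)) (start : Int) : List Int → List (Int × Int)
  | [] => []
  | e :: rest =>
    if isValidTok (PySem.List.pyGetD offsets e (0, 0)) then
      (start, e) :: innerLoopA offsets start rest
    else []

def enumerate_candidates_py (offsets : List (Int × Int)) (max_span_len : Int) : List (Int × Int) :=
  let valid_idxs : List Int :=
    ((PySem.List.enumerate offsets 0).filter (fun p => isValidTok p.2)).map (·.1)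
  valid_idxs.foldl
    (fun acc start =>
      let max_end : Int := min (start + max_span_len - 1) ((offsets.length : Int) - 1)
      acc ++ innerLoopA offsets start (PySem.List.pyRange start (max_end + 1) 1))
    []

-- ===== PORT B =====
-- backward pass filling run lengths (Source B's reverse index loop, as a foldr)
def runLens (offsets : List (Int × Int)) : List Nat :=
  offsets.foldr (fun p acc => (if isValidTok p then acc.headD 0 + 1 else 0) :: acc) []

def enumerate_candidates_py_alt (offsets : List (Int × Int)) (max_span_len : Int) : List (Int × Int) :=
  let run := runLens offsets
  (List.range offsets.length).flatMap (fun i =>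
    let r := run.getD i 0
    if r > 0 then
      (List.range (min max_span_len (r : Int)).toNat).map
        (fun j : Nat => ((i : Int), (i : Int) + (j : Int)))
    else [])

-- ===== PRECONDITION & SPEC =====
def Spec_enumerate_candidates_py (offsets : List (Int × Int)) (max_span_len : Int) (out : List (Int × Int)) : Prop := out = enumerate_candidates_py_alt offsets max_span_len
instance (offsets : List (Int × Int)) (max_span_len : Int) (out : List (Int × Int)) : Decidable (Spec_enumerate_candidates_py offsets max_span_len out) := by unfold Spec_enumerate_candidates_py; infer_instance

-- ===== CLAIM (what is proved, stated in full; the proofs are below) =====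
def Claim_equal_enumerate_candidates_py : Prop := ∀ (offsets : List (Int × Int)) (max_span_len : Int), Dom_enumerate_candidates_py offsets max_span_len → Spec_enumerate_candidates_py offsets max_span_len (enumerate_candidates_py offsets max_span_len)

-- ===== LEMMAS AND PROOFS =====

theorem runLens_cons (p : Int × Int) (xs : List (Int × Int)) :
    runLens (p :: xs) = (if isValidTok p then (runLens xs).headD 0 + 1 else 0) :: runLens xs := rfl

theorem headD_eq_getD (l : List Nat) : l.headD 0 = l.getD 0 0 := by cases l <;> rfl

theorem runLens_getD_le (xs : List (Int × Int)) (i : Nat) :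
    (runLens xs).getD i 0 ≤ xs.length - i := by
  induction xs generalizing i with
  | nil => simp [runLens]
  | cons p xs ih =>
    cases i with
    | zero =>
      have h0 := ih 0
      simp only [runLens_cons, headD_eq_getD, List.getD_cons_zero, List.length_cons]
      split <;> omega
    | succ i => simpa [runLens_cons] using ih i

theorem runLens_getD_succ (xs : List (Int × Int)) (i : Nat) (h : i < xs.length) :
    (runLens xs).getD i 0 =
      if isValidTok (xs.getD i (0, 0)) then (runLens xs).getD (i + 1) 0 + 1 else 0 := by
  induction xs generalizing i with
  | nil => simp at h
  | cons p xs ih =>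
    cases i with
    | zero =>
      simp only [runLens_cons, headD_eq_getD, List.getD_cons_zero, List.getD_cons_succ]
    | succ i =>
      simp only [runLens_cons, List.getD_cons_succ, List.length_cons] at *
      exact ih i (by omega)

theorem runLens_pos_iff (xs : List (Int × Int)) (i : Nat) (h : i < xs.length) :
    0 < (runLens xs).getD i 0 ↔ isValidTok (xs.getD i (0, 0)) = true := by
  rw [runLens_getD_succ xs i h]
  split <;> simp_all

theorem inner_char (xs : List (Int × Int)) (start : Int) (fuel : Nat) :
    ∀ e stop : Int, 0 ≤ e → stop ≤ (xs.length : Int) → (stop - e).toNat ≤ fuel →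
    innerLoopA xs start (PySem.List.pyRange e stop 1) =
      (List.range (min (stop - e).toNat ((runLens xs).getD e.toNat 0))).map
        (fun j : Nat => (start, e + (j : Int))) := by
  induction fuel with
  | zero =>
    intro e stop he hstop hf
    have : stop ≤ e := by omega
    rw [PySem.List.pyRange_one_eq_nil this]
    have : (stop - e).toNat = 0 := by omega
    simp [this, innerLoopA]
  | succ fuel ih =>
    intro e stop he hstop hf
    by_cases hlt : e < stop
    · rw [PySem.List.pyRange_one_cons hlt]
      have hein : e.toNat < xs.length := by omega
      have hget : PySem.List.pyGetD xs e (0, 0) = xs.getD e.toNat (0, 0) := by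
        rw [PySem.List.pyGetD_eq_getElem xs (0, 0) he (by omega)]
        rw [List.getD_eq_getElem xs (0, 0) hein]
      by_cases hv : isValidTok (xs.getD e.toNat (0, 0)) = true
      · have hrec := ih (e + 1) stop (by omega) hstop (by omega)
        have hr : (runLens xs).getD e.toNat 0 = (runLens xs).getD (e.toNat + 1) 0 + 1 := by
          rw [runLens_getD_succ xs e.toNat hein, if_pos hv]
        have htn : (e + 1).toNat = e.toNat + 1 := by omega
        have hmin : min (stop - e).toNat ((runLens xs).getD (e.toNat + 1) 0 + 1)
            = min (stop - (e + 1)).toNat ((runLens xs).getD (e.toNat + 1) 0) + 1 := by omega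
        simp only [innerLoopA, hget, if_pos hv]
        rw [hrec, htn, hr, hmin, List.range_succ_eq_map, List.map_cons, List.map_map]
        congr 1
        · norm_num
        · apply List.map_congr_left
          intro j _
          simp only [Function.comp_apply, Nat.succ_eq_add_one]
          congr 1
          push_cast
          ring
      · have hr : (runLens xs).getD e.toNat 0 = 0 := by
          rw [runLens_getD_succ xs e.toNat hein, if_neg hv]
        simp only [innerLoopA, hget, hv, Bool.false_eq_true, if_false, hr, Nat.min_zero,
          List.range_zero, List.map_nil]
    · rw [PySem.List.pyRange_one_eq_nil (by omega)]
      have : (stop - e).toNat = 0 := by omega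
      simp [this, innerLoopA]

theorem flatMap_filter_of_nil {α β : Type} (p : α → Bool) (g : α → List β) :
    ∀ (l : List α), (∀ x ∈ l, p x = false → g x = []) →
    l.flatMap g = (l.filter p).flatMap g := by
  intro l
  induction l with
  | nil => intro _; rfl
  | cons x xs ih =>
    intro h
    by_cases hx : p x = true
    · simp [hx, ih (fun y hy => h y (by simp [hy]))]
    · simp only [Bool.not_eq_true] at hx
      simp [hx, h x (by simp) hx, ih (fun y hy => h y (by simp [hy]))]

theorem valid_idxs_char (q : (Int × Int) → Bool) :
    ∀ (xs : List (Int × Int)) (s : Nat),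
    ((PySem.List.enumerate xs (s : Int)).filter (fun p => q p.2)).map (·.1) =
      ((List.range xs.length).filter (fun i => q (xs.getD i (0, 0)))).map (fun i : Nat => ((s + i : Nat) : Int)) := by
  intro xs
  induction xs with
  | nil => intro s; simp [PySem.List.enumerate_nil]
  | cons x xs ih =>
    intro s
    have hcast : ((s : Int) + 1) = ((s + 1 : Nat) : Int) := by push_cast; ring
    have hps : List.filter ((fun i => q ((x :: xs).getD i (0, 0))) ∘ Nat.succ) (List.range xs.length)
        = List.filter (fun i => q (xs.getD i (0, 0))) (List.range xs.length) := by
      apply List.filter_congr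
      intro i _
      simp
    have key : List.map (fun p : Int × (Int × Int) => p.1)
          ((PySem.List.enumerate xs ((s : Int) + 1)).filter (fun p => q p.2))
        = List.map ((fun i : Nat => ((s + i : Nat) : Int)) ∘ Nat.succ)
            (List.filter (fun i => q (xs.getD i (0, 0))) (List.range xs.length)) := by
      rw [hcast, ih (s + 1)]
      apply List.map_congr_left
      intro i _
      simp only [Function.comp_apply]
      congr 1
      omega
    rw [PySem.List.enumerate_cons]
    by_cases hx : q x = true <;>
      simp only [List.length_cons, List.range_succ_eq_map, List.filter_cons, List.getD_cons_zero,
        hx, if_true, Bool.false_eq_true, if_false, List.map_cons, List.filter_map, List.map_map,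
        hps, key, Nat.add_zero]

theorem flatMap_congr_mem {α β : Type} {l : List α} {f g : α → List β}
    (h : ∀ x ∈ l, f x = g x) : l.flatMap f = l.flatMap g := by
  induction l with
  | nil => rfl
  | cons x xs ih =>
    simp only [List.flatMap_cons, h x (by simp), ih (fun y hy => h y (by simp [hy]))]

theorem perIndex (offsets : List (Int × Int)) (msl : Int) (i : Nat)
    (hin : i < offsets.length) (hval : isValidTok (offsets.getD i (0, 0)) = true) :
    innerLoopA offsets (i : Int)
        (PySem.List.pyRange (i : Int) (min ((i : Int) + msl - 1) ((offsets.length : Int) - 1) + 1) 1) =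
      (List.range (min msl (((runLens offsets).getD i 0 : Nat) : Int)).toNat).map
        (fun j : Nat => ((i : Int), (i : Int) + (j : Int))) := by
  have hr := (runLens_pos_iff offsets i hin).2 hval
  have hle := runLens_getD_le offsets i
  set r := (runLens offsets).getD i 0 with hrdef
  set stop := min ((i : Int) + msl - 1) ((offsets.length : Int) - 1) + 1 with hstopdef
  have h1 := inner_char offsets (i : Int) (stop - (i : Int)).toNat (i : Int) stop
    (by positivity) (by omega) le_rfl
  rw [h1]
  have hti : ((i : Int)).toNat = i := Int.toNat_natCast i
  rw [hti, ← hrdef]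
  congr 2
  omega

-- ===== VERDICT (by name: the statement is the Claim_ definition above) =====
theorem enumerate_candidates_py_spec : Claim_equal_enumerate_candidates_py := by
  intro offsets msl _
  unfold Spec_enumerate_candidates_py enumerate_candidates_py enumerate_candidates_py_alt
  dsimp only
  rw [PySem.List.foldl_append_eq_flatMap, List.nil_append]
  have hv := valid_idxs_char isValidTok offsets 0
  simp only [Nat.cast_zero, Nat.zero_add] at hv
  rw [hv, List.flatMap_map]
  have hnil : ∀ i ∈ List.range offsets.length,
      (fun i => isValidTok (offsets.getD i (0, 0))) i = false →
      (fun i : Nat =>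
        if (runLens offsets).getD i 0 > 0 then
          (List.range (min msl (((runLens offsets).getD i 0 : Nat) : Int)).toNat).map
            (fun j : Nat => ((i : Int), (i : Int) + (j : Int)))
        else []) i = [] := by
    intro i hi hfalse
    have hin : i < offsets.length := List.mem_range.1 hi
    have hnp : ¬ 0 < (runLens offsets).getD i 0 := by
      rw [runLens_pos_iff offsets i hin]
      have hf' : isValidTok (offsets.getD i (0, 0)) = false := hfalse
      rw [hf']
      simp
    simp only [gt_iff_lt, hnp, if_false]
  rw [flatMap_filter_of_nil _ _ (List.range offsets.length) hnil]
  apply flatMap_congr_mem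
  intro i hi
  have hin : i < offsets.length := List.mem_range.1 (List.mem_filter.1 hi).1
  have hval : isValidTok (offsets.getD i (0, 0)) = true := (List.mem_filter.1 hi).2
  have hpos : 0 < (runLens offsets).getD i 0 := (runLens_pos_iff offsets i hin).2 hval
  simp only [gt_iff_lt, hpos, if_true]
  exact perIndex offsets msl i hin hval
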